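-- pv_equiv track=rewrite | github.com/hongyiheng/lc-base-on-doocs | Enumeration/3001.Minimum Moves to Capture The Queen/Solution.py | minMovesToCaptureTheQueen
-- ===== SOURCE A (Python) =====
-- def minMovesToCaptureTheQueen(a: int, b: int, c: int, d: int, e: int, f: int) -> int:
--     def check(i, j, dirs):
--         for dir in dirs:
--             x, y = i, j
--             while True:
--                 nx, ny = x + dir[0], y + dir[1]
--                 if nx < 1 or nx > 8 or ny < 1 or ny > 8:
--                     break
--                 if (nx == a and ny == b) or (nx == c and ny == d):
--                     break
--                 if nx == e and ny == f:
--                     return True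
--                 x, y = nx, ny
--         return False
--
--     ans1 = check(a, b, [[1, 0], [0, 1], [-1, 0], [0, -1]])
--     ans2 = check(c, d, [[1, 1], [1, -1], [-1, 1], [-1, -1]])
--     return 1 if ans1 or ans2 else 2
-- ===== SOURCE B (Python) =====
-- def minMovesToCaptureTheQueen(a: int, b: int, c: int, d: int, e: int, f: int) -> int:
--     # Direct arithmetic instead of walking rays square by square: for each direction,
--     # compute the step index at which the queen would be hit and check that the whole
--     # segment lies on the board and that no piece stands on it at an earlier-or-equal step.
--     def captures(x, y, dirs, bx, by):
--         for dx, dy in dirs: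
--             k = (e - x) * dx if dx else (f - y) * dy  # candidate step count to the queen
--             if k < 1 or (x + k * dx, y + k * dy) != (e, f):
--                 continue  # queen not on this ray
--             if not (1 <= x + dx <= 8 and 1 <= y + dy <= 8 and 1 <= e <= 8 and 1 <= f <= 8):
--                 continue  # segment leaves the board (it is monotone, so endpoints suffice)
--             clear = True
--             for px, py in ((x, y), (bx, by)):
--                 m = (px - x) * dx if dx else (py - y) * dy
--                 if 1 <= m <= k and (x + m * dx, y + m * dy) == (px, py):
--                     clear = False  # a piece blocks the ray at or before the queen
--             if clear:
--                 return True
--         return False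
--
--     rook = captures(a, b, [(1, 0), (0, 1), (-1, 0), (0, -1)], c, d)
--     bishop = captures(c, d, [(1, 1), (1, -1), (-1, 1), (-1, -1)], a, b)
--     return 1 if rook or bishop else 2
-- ===== Notes on version B (the rewrite author's own statement) =====
-- stated objective: alternative
-- what changed: Replaces A's square-by-square walking of eight rays (an unbounded while-loop per direction) with direct arithmetic per direction: compute the step index at which the queen would be hit, check the segment's endpoints stay on the board, and compute each piece's step index to see whether it blocks.
import Mathlib
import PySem

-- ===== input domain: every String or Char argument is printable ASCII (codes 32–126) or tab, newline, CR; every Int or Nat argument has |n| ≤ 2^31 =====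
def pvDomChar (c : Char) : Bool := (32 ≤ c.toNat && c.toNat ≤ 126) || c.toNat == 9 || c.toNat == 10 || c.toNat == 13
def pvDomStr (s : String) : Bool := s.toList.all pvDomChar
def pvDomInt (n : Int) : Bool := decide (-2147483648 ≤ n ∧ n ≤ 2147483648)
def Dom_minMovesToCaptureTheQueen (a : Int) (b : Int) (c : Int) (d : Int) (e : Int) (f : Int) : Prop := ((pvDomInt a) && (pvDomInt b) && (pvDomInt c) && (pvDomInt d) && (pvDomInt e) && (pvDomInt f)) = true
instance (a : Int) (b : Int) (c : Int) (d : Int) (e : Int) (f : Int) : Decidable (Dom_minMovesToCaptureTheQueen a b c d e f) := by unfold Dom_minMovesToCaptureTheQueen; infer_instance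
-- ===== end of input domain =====

-- B replaces A's square-by-square ray walking by direct per-direction arithmetic (step index of the queen and of each possible blocker); an alternative of the same cost.

-- ===== PORT A =====
-- Python's `while True` ray walk, made total with a fuel of 20 steps: the walk breaks as soon as
-- a step leaves the 8×8 board and moves monotonically in one direction while on the board, so it
-- performs at most 9 iterations on ANY input; the fuel case is never reached (the equivalence
-- proof goes through the exact ∃k ≤ 20 characterisation, which confirms this).
def pvGo (a b c d e f dx dy : Int) : Int → Int → Nat → Bool
  | _, _, 0 => false
  | x, y, Nat.succ n =>
    if x + dx < 1 ∨ x + dx > 8 ∨ y + dy < 1 ∨ y + dy > 8 then false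
    else if (x + dx = a ∧ y + dy = b) ∨ (x + dx = c ∧ y + dy = d) then false
    else if x + dx = e ∧ y + dy = f then true
    else pvGo a b c d e f dx dy (x + dx) (y + dy) n

-- Python's inner `check(i, j, dirs)` (returns True on the first direction whose ray hits the queen)
def pvCheck (a b c d e f i j : Int) (dirs : List (Int × Int)) : Bool :=
  dirs.any fun dir => pvGo a b c d e f dir.1 dir.2 i j 20

def minMovesToCaptureTheQueen (a : Int) (b : Int) (c : Int) (d : Int) (e : Int) (f : Int) : Int :=
  let ans1 := pvCheck a b c d e f a b [(1, 0), (0, 1), (-1, 0), (0, -1)]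
  let ans2 := pvCheck a b c d e f c d [(1, 1), (1, -1), (-1, 1), (-1, -1)]
  if ans1 || ans2 then 1 else 2

-- ===== PORT B =====
-- Python's inner blocker test: the piece at (px, py) stands on the ray at some step 1..k
def pvBlockedAt (x y dx dy k px py : Int) : Bool :=
  let m := if dx ≠ 0 then (px - x) * dx else (py - y) * dy
  decide (1 ≤ m ∧ m ≤ k ∧ x + m * dx = px ∧ y + m * dy = py)

-- one direction of Python's `captures` loop body
def pvCapDir (e f x y bx yb dx dy : Int) : Bool :=
  let k := if dx ≠ 0 then (e - x) * dx else (f - y) * dy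
  if k < 1 ∨ ¬ (x + k * dx = e ∧ y + k * dy = f) then false
  else if ¬ (1 ≤ x + dx ∧ x + dx ≤ 8 ∧ 1 ≤ y + dy ∧ y + dy ≤ 8 ∧
             1 ≤ e ∧ e ≤ 8 ∧ 1 ≤ f ∧ f ≤ 8) then false
  else !(pvBlockedAt x y dx dy k x y || pvBlockedAt x y dx dy k bx yb)

-- Python's `captures(x, y, dirs, bx, by)`
def pvCaptures (e f x y bx yb : Int) (dirs : List (Int × Int)) : Bool :=
  dirs.any fun dir => pvCapDir e f x y bx yb dir.1 dir.2

def minMovesToCaptureTheQueen_alt (a : Int) (b : Int) (c : Int) (d : Int) (e : Int) (f : Int) : Int :=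
  let rook := pvCaptures e f a b c d [(1, 0), (0, 1), (-1, 0), (0, -1)]
  let bishop := pvCaptures e f c d a b [(1, 1), (1, -1), (-1, 1), (-1, -1)]
  if rook || bishop then 1 else 2

-- ===== PRECONDITION & SPEC =====
def Spec_minMovesToCaptureTheQueen (a : Int) (b : Int) (c : Int) (d : Int) (e : Int) (f : Int) (out : Int) : Prop := out = minMovesToCaptureTheQueen_alt a b c d e f
instance (a : Int) (b : Int) (c : Int) (d : Int) (e : Int) (f : Int) (out : Int) : Decidable (Spec_minMovesToCaptureTheQueen a b c d e f out) := by unfold Spec_minMovesToCaptureTheQueen; infer_instance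

-- ===== CLAIM (what is proved, stated in full; the proofs are below) =====
def Claim_equal_minMovesToCaptureTheQueen : Prop := ∀ (a : Int) (b : Int) (c : Int) (d : Int) (e : Int) (f : Int), Dom_minMovesToCaptureTheQueen a b c d e f → Spec_minMovesToCaptureTheQueen a b c d e f (minMovesToCaptureTheQueen a b c d e f)

-- ===== LEMMAS AND PROOFS =====

-- The eight closed-form ray conditions (one per direction of A's two `check` calls).
def RayConds (a b c d e f : Int) : Prop :=
  (b = f ∧ a < e ∧ e ≤ 8 ∧ 0 ≤ a ∧ 1 ≤ f ∧ f ≤ 8 ∧ ¬(d = b ∧ a < c ∧ c ≤ e)) ∨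
  (a = e ∧ b < f ∧ f ≤ 8 ∧ 0 ≤ b ∧ 1 ≤ e ∧ e ≤ 8 ∧ ¬(c = a ∧ b < d ∧ d ≤ f)) ∨
  (b = f ∧ e < a ∧ 1 ≤ e ∧ a ≤ 9 ∧ 1 ≤ f ∧ f ≤ 8 ∧ ¬(d = b ∧ e ≤ c ∧ c < a)) ∨
  (a = e ∧ f < b ∧ 1 ≤ f ∧ b ≤ 9 ∧ 1 ≤ e ∧ e ≤ 8 ∧ ¬(c = a ∧ f ≤ d ∧ d < b)) ∨
  (e - c = f - d ∧ c < e ∧ e ≤ 8 ∧ f ≤ 8 ∧ 0 ≤ c ∧ 0 ≤ d ∧ ¬(a - c = b - d ∧ c < a ∧ a ≤ e)) ∨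
  (e - c = d - f ∧ c < e ∧ e ≤ 8 ∧ 1 ≤ f ∧ 0 ≤ c ∧ d ≤ 9 ∧ ¬(a - c = d - b ∧ c < a ∧ a ≤ e)) ∨
  (c - e = f - d ∧ e < c ∧ 1 ≤ e ∧ f ≤ 8 ∧ c ≤ 9 ∧ 0 ≤ d ∧ ¬(c - a = b - d ∧ e ≤ a ∧ a < c)) ∨
  (c - e = d - f ∧ e < c ∧ 1 ≤ e ∧ 1 ≤ f ∧ c ≤ 9 ∧ d ≤ 9 ∧ ¬(c - a = d - b ∧ e ≤ a ∧ a < c))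

lemma pvGo_iff (a b c d e f dx dy : Int) :
    ∀ (n : Nat) (x y : Int),
    pvGo a b c d e f dx dy x y n = true ↔
    ∃ k : Int, 1 ≤ k ∧ k ≤ (n : Int) ∧ x + k * dx = e ∧ y + k * dy = f ∧
      ∀ j : Int, 1 ≤ j → j ≤ k →
        (1 ≤ x + j * dx ∧ x + j * dx ≤ 8 ∧ 1 ≤ y + j * dy ∧ y + j * dy ≤ 8) ∧
        ¬((x + j * dx = a ∧ y + j * dy = b) ∨ (x + j * dx = c ∧ y + j * dy = d)) := by
  intro n
  induction n with
  | zero =>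
    intro x y
    simp only [pvGo, Nat.cast_zero]
    constructor
    · intro h; cases h
    · rintro ⟨k, hk1, hk2, -⟩; exact absurd (le_trans hk1 hk2) (by norm_num)
  | succ n ih =>
    intro x y
    simp only [pvGo]
    split_ifs with h1 h2 h3
    · constructor
      · intro h; cases h
      · rintro ⟨k, hk1, hk2, he, hf, hall⟩
        have h := (hall 1 le_rfl hk1).1
        simp only [one_mul] at h
        omega
    · constructor
      · intro h; cases h
      · rintro ⟨k, hk1, hk2, he, hf, hall⟩
        have h := (hall 1 le_rfl hk1).2
        simp only [one_mul] at h
        exact h h2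
    · constructor
      · intro _
        refine ⟨1, le_rfl, by omega, by simpa using h3.1, by simpa using h3.2, ?_⟩
        intro j hj1 hj2
        have hj : j = 1 := le_antisymm hj2 hj1
        subst hj
        simp only [one_mul]
        exact ⟨by omega, h2⟩
      · intro _; rfl
    · rw [ih (x + dx) (y + dy)]
      constructor
      · rintro ⟨k, hk1, hk2, he, hf, hall⟩
        refine ⟨k + 1, by omega, by omega, ?_, ?_, ?_⟩
        · have h : x + (k + 1) * dx = x + dx + k * dx := by ring
          rw [h]; exact he
        · have h : y + (k + 1) * dy = y + dy + k * dy := by ring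
          rw [h]; exact hf
        · intro j hj1 hj2
          by_cases hj : j = 1
          · subst hj
            simp only [one_mul]
            exact ⟨by omega, h2⟩
          · have h' := hall (j - 1) (by omega) (by omega)
            have e1 : x + j * dx = x + dx + (j - 1) * dx := by ring
            have e2 : y + j * dy = y + dy + (j - 1) * dy := by ring
            rw [e1, e2]; exact h'
      · rintro ⟨k, hk1, hk2, he, hf, hall⟩
        have hk1' : 1 < k := by
          rcases eq_or_lt_of_le hk1 with h | h
          · exfalso
            apply h3
            rw [← h] at he hf
            simp only [one_mul] at he hf
            exact ⟨he, hf⟩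
          · exact h
        refine ⟨k - 1, by omega, by omega, ?_, ?_, ?_⟩
        · have h : x + dx + (k - 1) * dx = x + k * dx := by ring
          rw [h]; exact he
        · have h : y + dy + (k - 1) * dy = y + k * dy := by ring
          rw [h]; exact hf
        · intro j hj1 hj2
          have h' := hall (j + 1) (by omega) (by omega)
          have e1 : x + dx + j * dx = x + (j + 1) * dx := by ring
          have e2 : y + dy + j * dy = y + (j + 1) * dy := by ring
          rw [e1, e2]; exact h'

lemma ray_E (a b c d e f : Int) :
    pvGo a b c d e f 1 0 a b 20 = true ↔
    (b = f ∧ a < e ∧ e ≤ 8 ∧ 0 ≤ a ∧ 1 ≤ f ∧ f ≤ 8 ∧ ¬(d = b ∧ a < c ∧ c ≤ e)) := by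
  rw [pvGo_iff]
  constructor
  · rintro ⟨k, hk1, hk2, he, hf, hall⟩
    have h1 := (hall 1 le_rfl hk1).1
    have hk := (hall k hk1 le_rfl).1
    refine ⟨by omega, by omega, by omega, by omega, by omega, by omega, ?_⟩
    rintro ⟨hd, hc1, hc2⟩
    exact (hall (c - a) (by omega) (by omega)).2 (Or.inr ⟨by omega, by omega⟩)
  · rintro ⟨hbf, hae, he8, ha0, hf1, hf8, hblk⟩
    refine ⟨e - a, by omega, by omega, by omega, by omega, ?_⟩
    intro j hj1 hj2
    refine ⟨by omega, ?_⟩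
    rintro (⟨h, -⟩ | ⟨h, h'⟩)
    · omega
    · exact hblk ⟨by omega, by omega, by omega⟩

lemma ray_N (a b c d e f : Int) :
    pvGo a b c d e f 0 1 a b 20 = true ↔
    (a = e ∧ b < f ∧ f ≤ 8 ∧ 0 ≤ b ∧ 1 ≤ e ∧ e ≤ 8 ∧ ¬(c = a ∧ b < d ∧ d ≤ f)) := by
  rw [pvGo_iff]
  constructor
  · rintro ⟨k, hk1, hk2, he, hf, hall⟩
    have h1 := (hall 1 le_rfl hk1).1
    have hk := (hall k hk1 le_rfl).1
    refine ⟨by omega, by omega, by omega, by omega, by omega, by omega, ?_⟩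
    rintro ⟨hc, hd1, hd2⟩
    exact (hall (d - b) (by omega) (by omega)).2 (Or.inr ⟨by omega, by omega⟩)
  · rintro ⟨hae, hbf, hf8, hb0, he1, he8, hblk⟩
    refine ⟨f - b, by omega, by omega, by omega, by omega, ?_⟩
    intro j hj1 hj2
    refine ⟨by omega, ?_⟩
    rintro (⟨-, h⟩ | ⟨h, h'⟩)
    · omega
    · exact hblk ⟨by omega, by omega, by omega⟩

lemma ray_W (a b c d e f : Int) :
    pvGo a b c d e f (-1) 0 a b 20 = true ↔
    (b = f ∧ e < a ∧ 1 ≤ e ∧ a ≤ 9 ∧ 1 ≤ f ∧ f ≤ 8 ∧ ¬(d = b ∧ e ≤ c ∧ c < a)) := by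
  rw [pvGo_iff]
  constructor
  · rintro ⟨k, hk1, hk2, he, hf, hall⟩
    have h1 := (hall 1 le_rfl hk1).1
    have hk := (hall k hk1 le_rfl).1
    refine ⟨by omega, by omega, by omega, by omega, by omega, by omega, ?_⟩
    rintro ⟨hd, hc1, hc2⟩
    exact (hall (a - c) (by omega) (by omega)).2 (Or.inr ⟨by omega, by omega⟩)
  · rintro ⟨hbf, hae, he1, ha9, hf1, hf8, hblk⟩
    refine ⟨a - e, by omega, by omega, by omega, by omega, ?_⟩
    intro j hj1 hj2
    refine ⟨by omega, ?_⟩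
    rintro (⟨h, -⟩ | ⟨h, h'⟩)
    · omega
    · exact hblk ⟨by omega, by omega, by omega⟩

lemma ray_S (a b c d e f : Int) :
    pvGo a b c d e f 0 (-1) a b 20 = true ↔
    (a = e ∧ f < b ∧ 1 ≤ f ∧ b ≤ 9 ∧ 1 ≤ e ∧ e ≤ 8 ∧ ¬(c = a ∧ f ≤ d ∧ d < b)) := by
  rw [pvGo_iff]
  constructor
  · rintro ⟨k, hk1, hk2, he, hf, hall⟩
    have h1 := (hall 1 le_rfl hk1).1
    have hk := (hall k hk1 le_rfl).1
    refine ⟨by omega, by omega, by omega, by omega, by omega, by omega, ?_⟩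
    rintro ⟨hc, hd1, hd2⟩
    exact (hall (b - d) (by omega) (by omega)).2 (Or.inr ⟨by omega, by omega⟩)
  · rintro ⟨hae, hbf, hf1, hb9, he1, he8, hblk⟩
    refine ⟨b - f, by omega, by omega, by omega, by omega, ?_⟩
    intro j hj1 hj2
    refine ⟨by omega, ?_⟩
    rintro (⟨-, h⟩ | ⟨h, h'⟩)
    · omega
    · exact hblk ⟨by omega, by omega, by omega⟩

lemma ray_NE (a b c d e f : Int) :
    pvGo a b c d e f 1 1 c d 20 = true ↔
    (e - c = f - d ∧ c < e ∧ e ≤ 8 ∧ f ≤ 8 ∧ 0 ≤ c ∧ 0 ≤ d ∧ ¬(a - c = b - d ∧ c < a ∧ a ≤ e)) := by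
  rw [pvGo_iff]
  constructor
  · rintro ⟨k, hk1, hk2, he, hf, hall⟩
    have h1 := (hall 1 le_rfl hk1).1
    have hk := (hall k hk1 le_rfl).1
    refine ⟨by omega, by omega, by omega, by omega, by omega, by omega, ?_⟩
    rintro ⟨hab, hc1, hc2⟩
    exact (hall (a - c) (by omega) (by omega)).2 (Or.inl ⟨by omega, by omega⟩)
  · rintro ⟨hdiag, hce, he8, hf8, hc0, hd0, hblk⟩
    refine ⟨e - c, by omega, by omega, by omega, by omega, ?_⟩
    intro j hj1 hj2
    refine ⟨by omega, ?_⟩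
    rintro (⟨h, h'⟩ | ⟨h, -⟩)
    · exact hblk ⟨by omega, by omega, by omega⟩
    · omega

lemma ray_SE (a b c d e f : Int) :
    pvGo a b c d e f 1 (-1) c d 20 = true ↔
    (e - c = d - f ∧ c < e ∧ e ≤ 8 ∧ 1 ≤ f ∧ 0 ≤ c ∧ d ≤ 9 ∧ ¬(a - c = d - b ∧ c < a ∧ a ≤ e)) := by
  rw [pvGo_iff]
  constructor
  · rintro ⟨k, hk1, hk2, he, hf, hall⟩
    have h1 := (hall 1 le_rfl hk1).1
    have hk := (hall k hk1 le_rfl).1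
    refine ⟨by omega, by omega, by omega, by omega, by omega, by omega, ?_⟩
    rintro ⟨hab, hc1, hc2⟩
    exact (hall (a - c) (by omega) (by omega)).2 (Or.inl ⟨by omega, by omega⟩)
  · rintro ⟨hdiag, hce, he8, hf1, hc0, hd9, hblk⟩
    refine ⟨e - c, by omega, by omega, by omega, by omega, ?_⟩
    intro j hj1 hj2
    refine ⟨by omega, ?_⟩
    rintro (⟨h, h'⟩ | ⟨h, -⟩)
    · exact hblk ⟨by omega, by omega, by omega⟩
    · omega

lemma ray_NW (a b c d e f : Int) :
    pvGo a b c d e f (-1) 1 c d 20 = true ↔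
    (c - e = f - d ∧ e < c ∧ 1 ≤ e ∧ f ≤ 8 ∧ c ≤ 9 ∧ 0 ≤ d ∧ ¬(c - a = b - d ∧ e ≤ a ∧ a < c)) := by
  rw [pvGo_iff]
  constructor
  · rintro ⟨k, hk1, hk2, he, hf, hall⟩
    have h1 := (hall 1 le_rfl hk1).1
    have hk := (hall k hk1 le_rfl).1
    refine ⟨by omega, by omega, by omega, by omega, by omega, by omega, ?_⟩
    rintro ⟨hab, hc1, hc2⟩
    exact (hall (c - a) (by omega) (by omega)).2 (Or.inl ⟨by omega, by omega⟩)
  · rintro ⟨hdiag, hce, he1, hf8, hc9, hd0, hblk⟩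
    refine ⟨c - e, by omega, by omega, by omega, by omega, ?_⟩
    intro j hj1 hj2
    refine ⟨by omega, ?_⟩
    rintro (⟨h, h'⟩ | ⟨h, -⟩)
    · exact hblk ⟨by omega, by omega, by omega⟩
    · omega

lemma ray_SW (a b c d e f : Int) :
    pvGo a b c d e f (-1) (-1) c d 20 = true ↔
    (c - e = d - f ∧ e < c ∧ 1 ≤ e ∧ 1 ≤ f ∧ c ≤ 9 ∧ d ≤ 9 ∧ ¬(c - a = d - b ∧ e ≤ a ∧ a < c)) := by
  rw [pvGo_iff]
  constructor
  · rintro ⟨k, hk1, hk2, he, hf, hall⟩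
    have h1 := (hall 1 le_rfl hk1).1
    have hk := (hall k hk1 le_rfl).1
    refine ⟨by omega, by omega, by omega, by omega, by omega, by omega, ?_⟩
    rintro ⟨hab, hc1, hc2⟩
    exact (hall (c - a) (by omega) (by omega)).2 (Or.inl ⟨by omega, by omega⟩)
  · rintro ⟨hdiag, hce, he1, hf1, hc9, hd9, hblk⟩
    refine ⟨c - e, by omega, by omega, by omega, by omega, ?_⟩
    intro j hj1 hj2
    refine ⟨by omega, ?_⟩
    rintro (⟨h, h'⟩ | ⟨h, -⟩)
    · exact hblk ⟨by omega, by omega, by omega⟩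
    · omega

lemma Abool_iff (a b c d e f : Int) :
    (pvCheck a b c d e f a b [(1, 0), (0, 1), (-1, 0), (0, -1)] ||
     pvCheck a b c d e f c d [(1, 1), (1, -1), (-1, 1), (-1, -1)]) = true ↔
    RayConds a b c d e f := by
  have e1 := ray_E a b c d e f
  have e2 := ray_N a b c d e f
  have e3 := ray_W a b c d e f
  have e4 := ray_S a b c d e f
  have e5 := ray_NE a b c d e f
  have e6 := ray_SE a b c d e f
  have e7 := ray_NW a b c d e f
  have e8 := ray_SW a b c d e f
  show ((pvGo a b c d e f 1 0 a b 20 ||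
         (pvGo a b c d e f 0 1 a b 20 ||
          (pvGo a b c d e f (-1) 0 a b 20 ||
           (pvGo a b c d e f 0 (-1) a b 20 || false)))) ||
        (pvGo a b c d e f 1 1 c d 20 ||
         (pvGo a b c d e f 1 (-1) c d 20 ||
          (pvGo a b c d e f (-1) 1 c d 20 ||
           (pvGo a b c d e f (-1) (-1) c d 20 || false))))) = true ↔
       RayConds a b c d e f
  simp only [Bool.or_false, Bool.or_eq_true]
  rw [e1, e2, e3, e4, e5, e6, e7, e8]
  unfold RayConds
  simp only [or_assoc]

lemma A_one (a b c d e f : Int) (h : RayConds a b c d e f) :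
    minMovesToCaptureTheQueen a b c d e f = 1 := by
  show (if (pvCheck a b c d e f a b [(1, 0), (0, 1), (-1, 0), (0, -1)] ||
            pvCheck a b c d e f c d [(1, 1), (1, -1), (-1, 1), (-1, -1)]) = true
        then (1 : Int) else 2) = 1
  rw [if_pos ((Abool_iff a b c d e f).mpr h)]

lemma A_two (a b c d e f : Int) (h : ¬ RayConds a b c d e f) :
    minMovesToCaptureTheQueen a b c d e f = 2 := by
  show (if (pvCheck a b c d e f a b [(1, 0), (0, 1), (-1, 0), (0, -1)] ||
            pvCheck a b c d e f c d [(1, 1), (1, -1), (-1, 1), (-1, -1)]) = true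
        then (1 : Int) else 2) = 2
  rw [if_neg (fun hb => h ((Abool_iff a b c d e f).mp hb))]

lemma cap_E (a b c d e f : Int) :
    pvCapDir e f a b c d 1 0 = true ↔
    (b = f ∧ a < e ∧ e ≤ 8 ∧ 0 ≤ a ∧ 1 ≤ f ∧ f ≤ 8 ∧ ¬(d = b ∧ a < c ∧ c ≤ e)) := by
  simp only [pvCapDir, pvBlockedAt]
  norm_num
  omega

lemma cap_N (a b c d e f : Int) :
    pvCapDir e f a b c d 0 1 = true ↔
    (a = e ∧ b < f ∧ f ≤ 8 ∧ 0 ≤ b ∧ 1 ≤ e ∧ e ≤ 8 ∧ ¬(c = a ∧ b < d ∧ d ≤ f)) := by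
  simp only [pvCapDir, pvBlockedAt]
  norm_num
  omega

lemma cap_W (a b c d e f : Int) :
    pvCapDir e f a b c d (-1) 0 = true ↔
    (b = f ∧ e < a ∧ 1 ≤ e ∧ a ≤ 9 ∧ 1 ≤ f ∧ f ≤ 8 ∧ ¬(d = b ∧ e ≤ c ∧ c < a)) := by
  simp only [pvCapDir, pvBlockedAt]
  norm_num
  omega

lemma cap_S (a b c d e f : Int) :
    pvCapDir e f a b c d 0 (-1) = true ↔
    (a = e ∧ f < b ∧ 1 ≤ f ∧ b ≤ 9 ∧ 1 ≤ e ∧ e ≤ 8 ∧ ¬(c = a ∧ f ≤ d ∧ d < b)) := by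
  simp only [pvCapDir, pvBlockedAt]
  norm_num
  omega

lemma cap_NE (a b c d e f : Int) :
    pvCapDir e f c d a b 1 1 = true ↔
    (e - c = f - d ∧ c < e ∧ e ≤ 8 ∧ f ≤ 8 ∧ 0 ≤ c ∧ 0 ≤ d ∧ ¬(a - c = b - d ∧ c < a ∧ a ≤ e)) := by
  simp only [pvCapDir, pvBlockedAt]
  norm_num
  omega

lemma cap_SE (a b c d e f : Int) :
    pvCapDir e f c d a b 1 (-1) = true ↔
    (e - c = d - f ∧ c < e ∧ e ≤ 8 ∧ 1 ≤ f ∧ 0 ≤ c ∧ d ≤ 9 ∧ ¬(a - c = d - b ∧ c < a ∧ a ≤ e)) := by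
  simp only [pvCapDir, pvBlockedAt]
  norm_num
  omega

lemma cap_NW (a b c d e f : Int) :
    pvCapDir e f c d a b (-1) 1 = true ↔
    (c - e = f - d ∧ e < c ∧ 1 ≤ e ∧ f ≤ 8 ∧ c ≤ 9 ∧ 0 ≤ d ∧ ¬(c - a = b - d ∧ e ≤ a ∧ a < c)) := by
  simp only [pvCapDir, pvBlockedAt]
  norm_num
  omega

lemma cap_SW (a b c d e f : Int) :
    pvCapDir e f c d a b (-1) (-1) = true ↔
    (c - e = d - f ∧ e < c ∧ 1 ≤ e ∧ 1 ≤ f ∧ c ≤ 9 ∧ d ≤ 9 ∧ ¬(c - a = d - b ∧ e ≤ a ∧ a < c)) := by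
  simp only [pvCapDir, pvBlockedAt]
  norm_num
  omega

lemma Bbool_iff (a b c d e f : Int) :
    (pvCaptures e f a b c d [(1, 0), (0, 1), (-1, 0), (0, -1)] ||
     pvCaptures e f c d a b [(1, 1), (1, -1), (-1, 1), (-1, -1)]) = true ↔
    RayConds a b c d e f := by
  have e1 := cap_E a b c d e f
  have e2 := cap_N a b c d e f
  have e3 := cap_W a b c d e f
  have e4 := cap_S a b c d e f
  have e5 := cap_NE a b c d e f
  have e6 := cap_SE a b c d e f
  have e7 := cap_NW a b c d e f
  have e8 := cap_SW a b c d e f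
  show ((pvCapDir e f a b c d 1 0 ||
         (pvCapDir e f a b c d 0 1 ||
          (pvCapDir e f a b c d (-1) 0 ||
           (pvCapDir e f a b c d 0 (-1) || false)))) ||
        (pvCapDir e f c d a b 1 1 ||
         (pvCapDir e f c d a b 1 (-1) ||
          (pvCapDir e f c d a b (-1) 1 ||
           (pvCapDir e f c d a b (-1) (-1) || false))))) = true ↔
       RayConds a b c d e f
  simp only [Bool.or_false, Bool.or_eq_true]
  rw [e1, e2, e3, e4, e5, e6, e7, e8]
  unfold RayConds
  simp only [or_assoc]

lemma B_one (a b c d e f : Int) (h : RayConds a b c d e f) :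
    minMovesToCaptureTheQueen_alt a b c d e f = 1 := by
  show (if (pvCaptures e f a b c d [(1, 0), (0, 1), (-1, 0), (0, -1)] ||
            pvCaptures e f c d a b [(1, 1), (1, -1), (-1, 1), (-1, -1)]) = true
        then (1 : Int) else 2) = 1
  rw [if_pos ((Bbool_iff a b c d e f).mpr h)]

lemma B_two (a b c d e f : Int) (h : ¬ RayConds a b c d e f) :
    minMovesToCaptureTheQueen_alt a b c d e f = 2 := by
  show (if (pvCaptures e f a b c d [(1, 0), (0, 1), (-1, 0), (0, -1)] ||
            pvCaptures e f c d a b [(1, 1), (1, -1), (-1, 1), (-1, -1)]) = true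
        then (1 : Int) else 2) = 2
  rw [if_neg (fun hb => h ((Bbool_iff a b c d e f).mp hb))]

-- ===== VERDICT (by name: the statement is the Claim_ definition above) =====
theorem minMovesToCaptureTheQueen_spec : Claim_equal_minMovesToCaptureTheQueen := by
  intro a b c d e f _
  unfold Spec_minMovesToCaptureTheQueen
  by_cases h : RayConds a b c d e f
  · rw [A_one a b c d e f h, B_one a b c d e f h]
  · rw [A_two a b c d e f h, B_two a b c d e f h]
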